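-- pv_equiv track=rewrite | github.com/theSaeed/opinion-mining-using-llms | dataset/utils/extract_tpi.py | filter_csds_objects_all
-- ===== SOURCE A (Python) =====
-- def filter_csds_objects_all(csds_objects, train_ids, val_ids, test_ids):
--     train_ids_set = set(train_ids)
--     val_ids_set = set(val_ids)
--     test_ids_set = set(test_ids)
--
--     train_objects, val_objects, test_objects = [], [], []
--
--     for csds_object in csds_objects:
--         if csds_object['unique_id'] in val_ids_set:
--             val_objects.append(csds_object)
--         elif csds_object['unique_id'] in test_ids_set:
--             test_objects.append(csds_object)
--         elif csds_object['unique_id'] in train_ids_set: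
--             train_objects.append(csds_object)
--
--     return train_objects, val_objects, test_objects
-- ===== SOURCE B (Python) =====
-- def filter_csds_objects_all(csds_objects, train_ids, val_ids, test_ids):
--     # Resolve the val > test > train priority once, by set difference,
--     # so the buckets become three disjoint sets; then each output is a plain filter.
--     val_set = set(val_ids)
--     test_set = set(test_ids) - val_set
--     train_set = (set(train_ids) - val_set) - test_set
--
--     train_objects = [o for o in csds_objects if o['unique_id'] in train_set]
--     val_objects = [o for o in csds_objects if o['unique_id'] in val_set]
--     test_objects = [o for o in csds_objects if o['unique_id'] in test_set]
--     return train_objects, val_objects, test_objects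
-- ===== Notes on version B (the rewrite author's own statement) =====
-- stated objective: alternative
-- what changed: Resolves the val>test>train priority up front by set differences into three disjoint id sets and then builds each bucket as an independent filter pass (three staged filters) instead of A's single pass with a per-object elif chain and a triple accumulator.
import Mathlib
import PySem

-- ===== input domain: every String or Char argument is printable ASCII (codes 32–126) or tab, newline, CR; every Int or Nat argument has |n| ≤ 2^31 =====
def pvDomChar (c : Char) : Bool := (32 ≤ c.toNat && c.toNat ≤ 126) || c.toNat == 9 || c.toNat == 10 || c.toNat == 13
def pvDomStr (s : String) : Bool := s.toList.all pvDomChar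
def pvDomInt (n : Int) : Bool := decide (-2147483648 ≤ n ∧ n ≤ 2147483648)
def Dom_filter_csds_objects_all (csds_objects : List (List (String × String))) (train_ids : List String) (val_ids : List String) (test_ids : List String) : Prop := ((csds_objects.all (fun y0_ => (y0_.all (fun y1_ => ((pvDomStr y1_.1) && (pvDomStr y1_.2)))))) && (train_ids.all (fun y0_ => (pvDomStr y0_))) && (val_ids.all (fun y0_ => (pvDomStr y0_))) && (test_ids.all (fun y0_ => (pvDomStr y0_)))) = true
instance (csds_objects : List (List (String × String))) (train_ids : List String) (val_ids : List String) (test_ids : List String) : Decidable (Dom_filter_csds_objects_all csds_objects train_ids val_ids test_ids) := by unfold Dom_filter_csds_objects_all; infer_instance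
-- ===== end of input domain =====

-- B resolves the val>test>train priority up front into three disjoint id sets (by set difference)
-- and builds each bucket as an independent filter pass, instead of A's single elif-chain pass (objective: alternative).


-- ===== PORT A =====
-- csds_object['unique_id'] is ported as getD "unique_id" "": Python raises KeyError when the key
-- is missing; Pre_ excludes exactly those inputs.
def filter_csds_objects_all (csds_objects : List (List (String × String))) (train_ids : List String) (val_ids : List String) (test_ids : List String) : (List (List (String × String))) × (List (List (String × String))) × (List (List (String × String))) :=
  let train_ids_set : PySem.Set String := PySem.Set.ofList train_ids
  let val_ids_set : PySem.Set String := PySem.Set.ofList val_ids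
  let test_ids_set : PySem.Set String := PySem.Set.ofList test_ids
  csds_objects.foldl (fun acc csds_object =>
    let uid := (PySem.Dict.mk csds_object).getD "unique_id" ""
    if PySem.Set.contains val_ids_set uid then (acc.1, acc.2.1 ++ [csds_object], acc.2.2)
    else if PySem.Set.contains test_ids_set uid then (acc.1, acc.2.1, acc.2.2 ++ [csds_object])
    else if PySem.Set.contains train_ids_set uid then (acc.1 ++ [csds_object], acc.2.1, acc.2.2)
    else acc) ([], [], [])

-- ===== PORT B =====
-- o['unique_id'] is ported as getD "unique_id" "" (B's Python raises KeyError there exactly like A;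
-- excluded by Pre_); the three list comprehensions become three List.filter passes.
def filter_csds_objects_all_alt (csds_objects : List (List (String × String))) (train_ids : List String) (val_ids : List String) (test_ids : List String) : (List (List (String × String))) × (List (List (String × String))) × (List (List (String × String))) :=
  let val_set : PySem.Set String := PySem.Set.ofList val_ids
  let test_set : PySem.Set String := PySem.Set.diff (PySem.Set.ofList test_ids) val_set
  let train_set : PySem.Set String := PySem.Set.diff (PySem.Set.diff (PySem.Set.ofList train_ids) val_set) test_set
  let train_objects := csds_objects.filter (fun o => PySem.Set.contains train_set ((PySem.Dict.mk o).getD "unique_id" ""))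
  let val_objects := csds_objects.filter (fun o => PySem.Set.contains val_set ((PySem.Dict.mk o).getD "unique_id" ""))
  let test_objects := csds_objects.filter (fun o => PySem.Set.contains test_set ((PySem.Dict.mk o).getD "unique_id" ""))
  (train_objects, val_objects, test_objects)

-- ===== PRECONDITION & SPEC =====
-- Pre_ excludes inputs where some object lacks a 'unique_id' key: there both Pythons raise KeyError.
def Pre_filter_csds_objects_all (csds_objects : List (List (String × String))) (train_ids : List String) (val_ids : List String) (test_ids : List String) : Prop :=
  ∀ o ∈ csds_objects, (PySem.Dict.mk o).contains "unique_id" = true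
instance (csds_objects : List (List (String × String))) (train_ids : List String) (val_ids : List String) (test_ids : List String) : Decidable (Pre_filter_csds_objects_all csds_objects train_ids val_ids test_ids) := by unfold Pre_filter_csds_objects_all; infer_instance
def pvWitness_filter_csds_objects_all : (List (List (String × String))) × List String × List String × List String :=
  ([[("unique_id", "a"), ("text", "x")], [("unique_id", "b")]], ["a"], ["b"], ["a"])
def Spec_filter_csds_objects_all (csds_objects : List (List (String × String))) (train_ids : List String) (val_ids : List String) (test_ids : List String) (out : (List (List (String × String))) × (List (List (String × String))) × (List (List (String × String)))) : Prop := out = filter_csds_objects_all_alt csds_objects train_ids val_ids test_ids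
instance (csds_objects : List (List (String × String))) (train_ids : List String) (val_ids : List String) (test_ids : List String) (out : (List (List (String × String))) × (List (List (String × String))) × (List (List (String × String)))) : Decidable (Spec_filter_csds_objects_all csds_objects train_ids val_ids test_ids out) := by unfold Spec_filter_csds_objects_all; infer_instance

-- ===== CLAIM (what is proved, stated in full; the proofs are below) =====
def Claim_equal_filter_csds_objects_all : Prop := ∀ (csds_objects : List (List (String × String))) (train_ids : List String) (val_ids : List String) (test_ids : List String), Dom_filter_csds_objects_all csds_objects train_ids val_ids test_ids → Pre_filter_csds_objects_all csds_objects train_ids val_ids test_ids → Spec_filter_csds_objects_all csds_objects train_ids val_ids test_ids (filter_csds_objects_all csds_objects train_ids val_ids test_ids)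

-- ===== LEMMAS AND PROOFS =====

-- A's single accumulator pass unrolls to three filters over the disjoint buckets.
theorem pvFoldA (train_ids val_ids test_ids : List String)
    (l : List (List (String × String)))
    (acc : (List (List (String × String))) × (List (List (String × String))) × (List (List (String × String)))) :
    l.foldl (fun acc csds_object =>
      let uid := (PySem.Dict.mk csds_object).getD "unique_id" ""
      if PySem.Set.contains (PySem.Set.ofList val_ids) uid then (acc.1, acc.2.1 ++ [csds_object], acc.2.2)
      else if PySem.Set.contains (PySem.Set.ofList test_ids) uid then (acc.1, acc.2.1, acc.2.2 ++ [csds_object])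
      else if PySem.Set.contains (PySem.Set.ofList train_ids) uid then (acc.1 ++ [csds_object], acc.2.1, acc.2.2)
      else acc) acc
    = (acc.1 ++ l.filter (fun o => PySem.Set.contains (PySem.Set.diff (PySem.Set.diff (PySem.Set.ofList train_ids) (PySem.Set.ofList val_ids)) (PySem.Set.diff (PySem.Set.ofList test_ids) (PySem.Set.ofList val_ids))) ((PySem.Dict.mk o).getD "unique_id" "")),
       acc.2.1 ++ l.filter (fun o => PySem.Set.contains (PySem.Set.ofList val_ids) ((PySem.Dict.mk o).getD "unique_id" "")),
       acc.2.2 ++ l.filter (fun o => PySem.Set.contains (PySem.Set.diff (PySem.Set.ofList test_ids) (PySem.Set.ofList val_ids)) ((PySem.Dict.mk o).getD "unique_id" ""))) := by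
  induction l generalizing acc with
  | nil => simp
  | cons o rest ih =>
    simp only [List.foldl_cons, List.filter_cons, ih]
    by_cases hv : (PySem.Dict.mk o).getD "unique_id" "" ∈ val_ids <;>
    by_cases ht : (PySem.Dict.mk o).getD "unique_id" "" ∈ test_ids <;>
    by_cases hr : (PySem.Dict.mk o).getD "unique_id" "" ∈ train_ids <;>
    simp [PySem.Set.mem_diff, PySem.Set.mem_ofList, hv, ht, hr]

-- ===== VERDICT (by name: the statement is the Claim_ definition above) =====
theorem filter_csds_objects_all_spec : Claim_equal_filter_csds_objects_all := by
  intro csds_objects train_ids val_ids test_ids _ _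
  unfold Spec_filter_csds_objects_all filter_csds_objects_all filter_csds_objects_all_alt
  simp only [pvFoldA, List.nil_append]
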